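-- pv_equiv track=rewrite | github.com/ClubStrideSolutions/Club-Stride-Prop-64-Impact-Tool | modules/ai_orchestrator.py | _rank_insights
-- ===== SOURCE A (Python) =====
-- from typing import Dict, List, Any, Optional
--
-- def _rank_insights(insights: List[Dict]) -> List[Dict]:
--     """Rank and deduplicate insights"""
--     # Simple deduplication based on title similarity
--     unique_insights = []
--     seen_titles = set()
--
--     for insight in insights:
--         title = insight.get('title', '').lower()
--         if title not in seen_titles:
--             seen_titles.add(title)
--             unique_insights.append(insight)
--
--     # Sort by priority
--     priority_order = {'high': 0, 'medium': 1, 'low': 2}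
--     unique_insights.sort(
--         key=lambda x: priority_order.get(x.get('priority', '').lower(), 3)
--     )
--
--     return unique_insights[:10]  # Return top 10
-- ===== SOURCE B (Python) =====
-- def _rank_insights(insights):
--     """Rank and deduplicate insights: one pass, bucket by the 4 fixed priority levels."""
--     seen_titles = set()
--     buckets = ([], [], [], [])
--     for insight in insights:
--         title = insight.get('title', '').lower()
--         if title in seen_titles:
--             continue
--         seen_titles.add(title)
--         p = insight.get('priority', '').lower()
--         if p == 'high':
--             i = 0
--         elif p == 'medium':
--             i = 1
--         elif p == 'low':
--             i = 2
--         else: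
--             i = 3
--         buckets[i].append(insight)
--     return (buckets[0] + buckets[1] + buckets[2] + buckets[3])[:10]
-- ===== Notes on version B (the rewrite author's own statement) =====
-- stated objective: alternative
-- what changed: Replaces dedup-pass-then-comparison-sort with a single pass that dedups by lowercased title and distributes each kept insight into one of four priority buckets, concatenated in priority order (a stable bucket sort exploiting the 4 fixed priority levels).
import Mathlib
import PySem

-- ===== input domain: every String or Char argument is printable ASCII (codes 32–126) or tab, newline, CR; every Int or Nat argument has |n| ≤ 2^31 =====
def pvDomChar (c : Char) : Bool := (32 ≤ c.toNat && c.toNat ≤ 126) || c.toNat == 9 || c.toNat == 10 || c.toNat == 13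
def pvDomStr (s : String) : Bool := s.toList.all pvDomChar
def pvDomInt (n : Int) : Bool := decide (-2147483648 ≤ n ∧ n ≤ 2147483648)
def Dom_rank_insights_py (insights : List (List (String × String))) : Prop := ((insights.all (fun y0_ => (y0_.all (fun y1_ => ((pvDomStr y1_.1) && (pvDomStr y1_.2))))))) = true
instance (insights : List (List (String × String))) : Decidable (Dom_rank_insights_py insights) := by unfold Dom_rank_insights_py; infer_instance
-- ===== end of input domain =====

-- B replaces A's dedup-pass-then-stable-comparison-sort by a single pass that dedups by
-- lowercased title and distributes kept insights into four priority buckets concatenated in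
-- priority order (alternative algorithm, same result).


-- ===== PORT A =====
-- priority_order.get(x.get('priority','').lower(), 3)
def aKey (x : List (String × String)) : Int :=
  PySem.Dict.getD (PySem.Dict.mk [("high", (0 : Int)), ("medium", 1), ("low", 2)])
    (PySem.Str.lower (PySem.Dict.getD (PySem.Dict.mk x) "priority" "")) 3

def rank_insights_py (insights : List (List (String × String))) : List (List (String × String)) :=
  let st := insights.foldl
    (fun (acc : List (List (String × String)) × PySem.Set String) insight =>
      let title := PySem.Str.lower (PySem.Dict.getD (PySem.Dict.mk insight) "title" "")
      if PySem.Set.contains acc.2 title then acc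
      else (acc.1 ++ [insight], PySem.Set.add acc.2 title))
    ([], PySem.Set.empty)
  PySem.List.slice (PySem.List.sorted st.1 aKey) none (some 10)

-- ===== PORT B =====
def rank_insights_py_alt (insights : List (List (String × String))) : List (List (String × String)) :=
  let st := insights.foldl
    (fun (acc : List (List (String × String)) × List (List (String × String)) ×
                List (List (String × String)) × List (List (String × String)) ×
                PySem.Set String) insight =>
      let title := PySem.Str.lower (PySem.Dict.getD (PySem.Dict.mk insight) "title" "")
      if PySem.Set.contains acc.2.2.2.2 title then acc
      else
        let seen := PySem.Set.add acc.2.2.2.2 title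
        let p := PySem.Str.lower (PySem.Dict.getD (PySem.Dict.mk insight) "priority" "")
        if p = "high" then (acc.1 ++ [insight], acc.2.1, acc.2.2.1, acc.2.2.2.1, seen)
        else if p = "medium" then (acc.1, acc.2.1 ++ [insight], acc.2.2.1, acc.2.2.2.1, seen)
        else if p = "low" then (acc.1, acc.2.1, acc.2.2.1 ++ [insight], acc.2.2.2.1, seen)
        else (acc.1, acc.2.1, acc.2.2.1, acc.2.2.2.1 ++ [insight], seen))
    ([], [], [], [], PySem.Set.empty)
  (st.1 ++ st.2.1 ++ st.2.2.1 ++ st.2.2.2.1).take 10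

-- ===== PRECONDITION & SPEC =====
def Spec_rank_insights_py (insights : List (List (String × String))) (out : List (List (String × String))) : Prop := out = rank_insights_py_alt insights
instance (insights : List (List (String × String))) (out : List (List (String × String))) : Decidable (Spec_rank_insights_py insights out) := by unfold Spec_rank_insights_py; infer_instance

-- ===== CLAIM (what is proved, stated in full; the proofs are below) =====
def Claim_equal_rank_insights_py : Prop := ∀ (insights : List (List (String × String))), Dom_rank_insights_py insights → Spec_rank_insights_py insights (rank_insights_py insights)

-- ===== LEMMAS AND PROOFS =====

theorem aKey_gen (p : String) :
    PySem.Dict.getD (PySem.Dict.mk [("high", (0 : Int)), ("medium", 1), ("low", 2)]) p 3 =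
      (if p = "high" then (0 : Int) else if p = "medium" then 1 else if p = "low" then 2 else 3) := by
  have e1 : ("high" == p) = decide (p = "high") := by
    by_cases h : p = "high"
    · simp [h]
    · have hb : ("high" == p) = false := beq_eq_false_iff_ne.mpr (Ne.symm h)
      simp [h, hb]
  have e2 : ("medium" == p) = decide (p = "medium") := by
    by_cases h : p = "medium"
    · simp [h]
    · have hb : ("medium" == p) = false := beq_eq_false_iff_ne.mpr (Ne.symm h)
      simp [h, hb]
  have e3 : ("low" == p) = decide (p = "low") := by
    by_cases h : p = "low"
    · simp [h]
    · have hb : ("low" == p) = false := beq_eq_false_iff_ne.mpr (Ne.symm h)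
      simp [h, hb]
  by_cases h1 : p = "high" <;> by_cases h2 : p = "medium" <;> by_cases h3 : p = "low" <;>
    simp [PySem.Dict.getD, PySem.Dict.get?, List.find?, e1, e2, e3, h1, h2, h3]

theorem aKey_eq (x : List (String × String)) :
    aKey x =
      (let p := PySem.Str.lower (PySem.Dict.getD (PySem.Dict.mk x) "priority" "")
       if p = "high" then (0 : Int) else if p = "medium" then 1 else if p = "low" then 2 else 3) := by
  unfold aKey
  exact aKey_gen _

theorem aKey_mem (x : List (String × String)) :
    aKey x = 0 ∨ aKey x = 1 ∨ aKey x = 2 ∨ aKey x = 3 := by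
  unfold aKey
  rw [aKey_gen]
  split_ifs <;> simp

theorem insertBy_split {α : Type} (bf : α → α → Bool) (x : α) (p q : List α)
    (hp : ∀ y ∈ p, bf x y = false) (hq : ∀ y ∈ q, bf x y = true) :
    PySem.List.insertBy bf x (p ++ q) = p ++ x :: q := by
  induction p with
  | nil =>
    cases q with
    | nil => simp [PySem.List.insertBy]
    | cons y ys => simp [PySem.List.insertBy, hq y (by simp)]
  | cons a p ih =>
    simp only [List.cons_append, PySem.List.insertBy, hp a (by simp), Bool.false_eq_true,
      if_false]
    rw [ih (fun y hy => hp y (by simp [hy]))]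

theorem foldl_insertBy_buckets (key : List (String × String) → Int)
    (xs b0 b1 b2 b3 : List (List (String × String)))
    (h0 : ∀ y ∈ b0, key y = 0) (h1 : ∀ y ∈ b1, key y = 1)
    (h2 : ∀ y ∈ b2, key y = 2) (h3 : ∀ y ∈ b3, key y = 3)
    (hk : ∀ x ∈ xs, key x = 0 ∨ key x = 1 ∨ key x = 2 ∨ key x = 3) :
    xs.foldl (fun acc x => PySem.List.insertBy (fun a b => decide (key a < key b)) x acc)
        (b0 ++ b1 ++ b2 ++ b3)
      = (b0 ++ xs.filter (fun x => decide (key x = 0)))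
        ++ (b1 ++ xs.filter (fun x => decide (key x = 1)))
        ++ (b2 ++ xs.filter (fun x => decide (key x = 2)))
        ++ (b3 ++ xs.filter (fun x => decide (key x = 3))) := by
  induction xs generalizing b0 b1 b2 b3 with
  | nil => simp
  | cons x xs ih =>
    have hk' : ∀ y ∈ xs, key y = 0 ∨ key y = 1 ∨ key y = 2 ∨ key y = 3 :=
      fun y hy => hk y (by simp [hy])
    have mem0 : ∀ y ∈ b0, key y = 0 := h0
    rcases hk x (by simp) with h | h | h | h
    · rw [List.foldl_cons,
        show b0 ++ b1 ++ b2 ++ b3 = b0 ++ (b1 ++ b2 ++ b3) by simp,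
        insertBy_split _ x b0 (b1 ++ b2 ++ b3)
          (fun y hy => by simp [h0 y hy, h])
          (fun y hy => by
            simp only [List.mem_append] at hy
            rcases hy with (hy | hy) | hy
            · simp [h1 y hy, h]
            · simp [h2 y hy, h]
            · simp [h3 y hy, h]),
        show b0 ++ x :: (b1 ++ b2 ++ b3) = (b0 ++ [x]) ++ b1 ++ b2 ++ b3 by simp,
        ih (b0 ++ [x]) b1 b2 b3
          (by intro y hy; simp only [List.mem_append, List.mem_singleton] at hy
              rcases hy with hy | hy
              · exact h0 y hy
              · simp [hy, h]) h1 h2 h3 hk']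
      simp [h]
    · rw [List.foldl_cons,
        show b0 ++ b1 ++ b2 ++ b3 = (b0 ++ b1) ++ (b2 ++ b3) by simp,
        insertBy_split _ x (b0 ++ b1) (b2 ++ b3)
          (fun y hy => by
            simp only [List.mem_append] at hy
            rcases hy with hy | hy
            · simp [h0 y hy, h]
            · simp [h1 y hy, h])
          (fun y hy => by
            simp only [List.mem_append] at hy
            rcases hy with hy | hy
            · simp [h2 y hy, h]
            · simp [h3 y hy, h]),
        show (b0 ++ b1) ++ x :: (b2 ++ b3) = b0 ++ (b1 ++ [x]) ++ b2 ++ b3 by simp,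
        ih b0 (b1 ++ [x]) b2 b3 h0
          (by intro y hy; simp only [List.mem_append, List.mem_singleton] at hy
              rcases hy with hy | hy
              · exact h1 y hy
              · simp [hy, h]) h2 h3 hk']
      simp [h]
    · rw [List.foldl_cons,
        show b0 ++ b1 ++ b2 ++ b3 = (b0 ++ b1 ++ b2) ++ b3 by simp,
        insertBy_split _ x (b0 ++ b1 ++ b2) b3
          (fun y hy => by
            simp only [List.mem_append] at hy
            rcases hy with (hy | hy) | hy
            · simp [h0 y hy, h]
            · simp [h1 y hy, h]
            · simp [h2 y hy, h])
          (fun y hy => by simp [h3 y hy, h]),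
        show (b0 ++ b1 ++ b2) ++ x :: b3 = b0 ++ b1 ++ (b2 ++ [x]) ++ b3 by simp,
        ih b0 b1 (b2 ++ [x]) b3 h0 h1
          (by intro y hy; simp only [List.mem_append, List.mem_singleton] at hy
              rcases hy with hy | hy
              · exact h2 y hy
              · simp [hy, h]) h3 hk']
      simp [h]
    · rw [List.foldl_cons,
        show b0 ++ b1 ++ b2 ++ b3 = (b0 ++ b1 ++ b2 ++ b3) ++ [] by simp,
        insertBy_split _ x (b0 ++ b1 ++ b2 ++ b3) []
          (fun y hy => by
            simp only [List.mem_append] at hy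
            rcases hy with ((hy | hy) | hy) | hy
            · simp [h0 y hy, h]
            · simp [h1 y hy, h]
            · simp [h2 y hy, h]
            · simp [h3 y hy, h])
          (fun y hy => by simp at hy),
        show (b0 ++ b1 ++ b2 ++ b3) ++ x :: [] = b0 ++ b1 ++ b2 ++ (b3 ++ [x]) by simp,
        ih b0 b1 b2 (b3 ++ [x]) h0 h1 h2
          (by intro y hy; simp only [List.mem_append, List.mem_singleton] at hy
              rcases hy with hy | hy
              · exact h3 y hy
              · simp [hy, h]) hk']
      simp [h]

theorem sorted_buckets (xs : List (List (String × String))) :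
    PySem.List.sorted xs aKey
      = xs.filter (fun x => decide (aKey x = 0))
        ++ xs.filter (fun x => decide (aKey x = 1))
        ++ xs.filter (fun x => decide (aKey x = 2))
        ++ xs.filter (fun x => decide (aKey x = 3)) := by
  rw [PySem.List.sorted_eq_foldl_insertBy]
  have := foldl_insertBy_buckets aKey xs [] [] [] []
    (by simp) (by simp) (by simp) (by simp) (fun x _ => aKey_mem x)
  simpa using this

theorem fold_sim (insights : List (List (String × String)))
    (u : List (List (String × String))) (s : PySem.Set String) :
    insights.foldl
      (fun (acc : List (List (String × String)) × List (List (String × String)) ×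
                  List (List (String × String)) × List (List (String × String)) ×
                  PySem.Set String) insight =>
        let title := PySem.Str.lower (PySem.Dict.getD (PySem.Dict.mk insight) "title" "")
        if PySem.Set.contains acc.2.2.2.2 title then acc
        else
          let seen := PySem.Set.add acc.2.2.2.2 title
          let p := PySem.Str.lower (PySem.Dict.getD (PySem.Dict.mk insight) "priority" "")
          if p = "high" then (acc.1 ++ [insight], acc.2.1, acc.2.2.1, acc.2.2.2.1, seen)
          else if p = "medium" then (acc.1, acc.2.1 ++ [insight], acc.2.2.1, acc.2.2.2.1, seen)
          else if p = "low" then (acc.1, acc.2.1, acc.2.2.1 ++ [insight], acc.2.2.2.1, seen)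
          else (acc.1, acc.2.1, acc.2.2.1, acc.2.2.2.1 ++ [insight], seen))
      (u.filter (fun x => decide (aKey x = 0)), u.filter (fun x => decide (aKey x = 1)),
       u.filter (fun x => decide (aKey x = 2)), u.filter (fun x => decide (aKey x = 3)), s)
    =
    ((insights.foldl
        (fun (acc : List (List (String × String)) × PySem.Set String) insight =>
          let title := PySem.Str.lower (PySem.Dict.getD (PySem.Dict.mk insight) "title" "")
          if PySem.Set.contains acc.2 title then acc
          else (acc.1 ++ [insight], PySem.Set.add acc.2 title)) (u, s)).1.filter
          (fun x => decide (aKey x = 0)),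
     (insights.foldl
        (fun (acc : List (List (String × String)) × PySem.Set String) insight =>
          let title := PySem.Str.lower (PySem.Dict.getD (PySem.Dict.mk insight) "title" "")
          if PySem.Set.contains acc.2 title then acc
          else (acc.1 ++ [insight], PySem.Set.add acc.2 title)) (u, s)).1.filter
          (fun x => decide (aKey x = 1)),
     (insights.foldl
        (fun (acc : List (List (String × String)) × PySem.Set String) insight =>
          let title := PySem.Str.lower (PySem.Dict.getD (PySem.Dict.mk insight) "title" "")
          if PySem.Set.contains acc.2 title then acc
          else (acc.1 ++ [insight], PySem.Set.add acc.2 title)) (u, s)).1.filter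
          (fun x => decide (aKey x = 2)),
     (insights.foldl
        (fun (acc : List (List (String × String)) × PySem.Set String) insight =>
          let title := PySem.Str.lower (PySem.Dict.getD (PySem.Dict.mk insight) "title" "")
          if PySem.Set.contains acc.2 title then acc
          else (acc.1 ++ [insight], PySem.Set.add acc.2 title)) (u, s)).1.filter
          (fun x => decide (aKey x = 3)),
     (insights.foldl
        (fun (acc : List (List (String × String)) × PySem.Set String) insight =>
          let title := PySem.Str.lower (PySem.Dict.getD (PySem.Dict.mk insight) "title" "")
          if PySem.Set.contains acc.2 title then acc
          else (acc.1 ++ [insight], PySem.Set.add acc.2 title)) (u, s)).2) := by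
  induction insights generalizing u s with
  | nil => rfl
  | cons x xs ih =>
    simp only [List.foldl_cons]
    by_cases hc : PySem.Set.contains s (PySem.Str.lower (PySem.Dict.getD (PySem.Dict.mk x) "title" "")) = true
    · simp only [hc, if_true]
      exact ih u s
    · simp only [hc, if_false, Bool.false_eq_true]
      have hkey := aKey_eq x
      set p := PySem.Str.lower (PySem.Dict.getD (PySem.Dict.mk x) "priority" "") with hpdef
      by_cases hh : p = "high"
      · simp only [hh, if_true]
        have := ih (u ++ [x]) (PySem.Set.add s (PySem.Str.lower (PySem.Dict.getD (PySem.Dict.mk x) "title" "")))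
        simpa [List.filter_append, hkey, hh] using this
      · by_cases hm : p = "medium"
        · simp only [hm, if_true]
          have := ih (u ++ [x]) (PySem.Set.add s (PySem.Str.lower (PySem.Dict.getD (PySem.Dict.mk x) "title" "")))
          simpa [List.filter_append, hkey, hh, hm] using this
        · by_cases hl : p = "low"
          · simp only [hl, if_true]
            have := ih (u ++ [x]) (PySem.Set.add s (PySem.Str.lower (PySem.Dict.getD (PySem.Dict.mk x) "title" "")))
            simpa [List.filter_append, hkey, hh, hm, hl] using this
          · have := ih (u ++ [x]) (PySem.Set.add s (PySem.Str.lower (PySem.Dict.getD (PySem.Dict.mk x) "title" "")))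
            simpa [List.filter_append, hkey, hh, hm, hl] using this

-- ===== VERDICT (by name: the statement is the Claim_ definition above) =====
theorem rank_insights_py_spec : Claim_equal_rank_insights_py := by
  intro insights _
  unfold Spec_rank_insights_py rank_insights_py rank_insights_py_alt
  have hslice : ∀ (xs : List (List (String × String))),
      PySem.List.slice xs none (some 10) = xs.take 10 := by
    intro xs
    have := PySem.List.slice_to_natCast xs 10
    simpa using this
  rw [hslice, sorted_buckets]
  have := fold_sim insights [] PySem.Set.empty
  simp only [List.filter_nil] at this
  rw [this]
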